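-- pv_equiv track=rewrite | github.com/mashd3v/CIC | Maestría/Semestre 1/Teoría de la computación/Tareas/Computabilidad/computabilidad_church.py | asignacion
-- ===== SOURCE A (Python) =====
-- def incremento(var):
--     return var + 1
--
-- def decremento(var):
--     return var - 1
--
-- def borrar(var):
--     while (var != 0):
--         var = decremento(var)
--     return var
--
-- def asignacion(var1, var2, aux=0):
--     aux = borrar(aux)
--     var1 = borrar(var1)
--     while (var2 != 0):
--         aux = incremento(aux)
--         var2 = decremento(var2)
--     while (aux != 0):
--         var1 = incremento(var1)
--         var2 = incremento(var2)
--         aux = decremento(aux)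
--     return var1, var2
-- ===== SOURCE B (Python) =====
-- def asignacion(var1, var2, aux=0):
--     # Church-style assignment copies var2 into var1; the result is simply
--     # (var2, var2), computed directly without counting loops.
--     return var2, var2
-- ===== Notes on version B (the rewrite author's own statement) =====
-- stated objective: faster
-- what changed: Replaced the three counting while-loops (clear aux and var1, drain var2 into aux, then drain aux into var1 and var2) by the closed form returning (var2, var2) directly.
import Mathlib
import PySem

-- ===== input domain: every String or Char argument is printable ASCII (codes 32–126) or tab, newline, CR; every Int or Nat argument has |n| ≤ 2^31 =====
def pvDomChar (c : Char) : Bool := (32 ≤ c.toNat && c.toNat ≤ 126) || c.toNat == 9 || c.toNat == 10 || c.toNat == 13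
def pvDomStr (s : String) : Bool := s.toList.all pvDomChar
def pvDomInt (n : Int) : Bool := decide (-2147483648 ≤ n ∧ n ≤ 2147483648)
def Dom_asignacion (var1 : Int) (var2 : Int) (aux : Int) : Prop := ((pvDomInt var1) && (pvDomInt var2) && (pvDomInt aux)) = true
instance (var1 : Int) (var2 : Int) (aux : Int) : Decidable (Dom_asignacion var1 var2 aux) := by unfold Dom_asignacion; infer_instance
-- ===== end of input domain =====

-- B replaces A's three counting while-loops by the closed form (var2, var2); faster (asymptotic).


-- ===== PORT A =====
def incremento (var : Int) : Int := var + 1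

def decremento (var : Int) : Int := var - 1

-- 'while var != 0: var = decremento(var)'; Python diverges for var < 0, where the
-- recursion stops instead (such inputs are outside Pre_).
def borrar (var : Int) : Int :=
  if var ≠ 0 ∧ 0 < var then borrar (decremento var) else var
termination_by var.toNat
decreasing_by simp [decremento]; omega

-- 'while var2 != 0: aux += 1; var2 -= 1'; diverges in Python for var2 < 0 (outside Pre_).
def asignacionLoop1 (aux : Int) (var2 : Int) : Int × Int :=
  if var2 ≠ 0 ∧ 0 < var2 then asignacionLoop1 (incremento aux) (decremento var2)
  else (aux, var2)
termination_by var2.toNat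
decreasing_by simp [decremento]; omega

-- 'while aux != 0: var1 += 1; var2 += 1; aux -= 1'; diverges in Python for aux < 0.
def asignacionLoop2 (var1 : Int) (var2 : Int) (aux : Int) : Int × Int :=
  if aux ≠ 0 ∧ 0 < aux then asignacionLoop2 (incremento var1) (incremento var2) (decremento aux)
  else (var1, var2)
termination_by aux.toNat
decreasing_by simp [decremento]; omega

def asignacion (var1 : Int) (var2 : Int) (aux : Int) : List Int :=
  let aux := borrar aux
  let var1 := borrar var1
  let p1 := asignacionLoop1 aux var2
  let p2 := asignacionLoop2 var1 p1.2 p1.1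
  [p2.1, p2.2]

-- ===== PORT B =====
def asignacion_alt (var1 : Int) (var2 : Int) (aux : Int) : List Int :=
  [var2, var2]

-- ===== PRECONDITION & SPEC =====
-- Pre_ excludes negative arguments: A's decrement-to-zero loops never terminate there.
def Pre_asignacion (var1 : Int) (var2 : Int) (aux : Int) : Prop :=
  0 ≤ var1 ∧ 0 ≤ var2 ∧ 0 ≤ aux
instance (var1 : Int) (var2 : Int) (aux : Int) : Decidable (Pre_asignacion var1 var2 aux) := by
  unfold Pre_asignacion; infer_instance

def pvWitness_asignacion : Int × Int × Int := (3, 5, 2)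

def Spec_asignacion (var1 : Int) (var2 : Int) (aux : Int) (out : List Int) : Prop := out = asignacion_alt var1 var2 aux
instance (var1 : Int) (var2 : Int) (aux : Int) (out : List Int) : Decidable (Spec_asignacion var1 var2 aux out) := by unfold Spec_asignacion; infer_instance

-- ===== CLAIM (what is proved, stated in full; the proofs are below) =====
def Claim_equal_asignacion : Prop := ∀ (var1 : Int) (var2 : Int) (aux : Int), Dom_asignacion var1 var2 aux → Pre_asignacion var1 var2 aux → Spec_asignacion var1 var2 aux (asignacion var1 var2 aux)

-- ===== LEMMAS AND PROOFS =====
theorem borrar_nonneg (var : Int) (h : 0 ≤ var) : borrar var = 0 := by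
  induction var using borrar.induct with
  | case1 var hc ih =>
    rw [borrar, if_pos hc]
    exact ih (by simp [decremento]; omega)
  | case2 var hc =>
    rw [borrar, if_neg hc]
    omega

theorem loop1_nonneg (aux var2 : Int) (h : 0 ≤ var2) :
    asignacionLoop1 aux var2 = (aux + var2, 0) := by
  induction aux, var2 using asignacionLoop1.induct with
  | case1 aux var2 hc ih =>
    rw [asignacionLoop1, if_pos hc, ih (by simp [decremento]; omega)]
    simp [incremento, decremento]
  | case2 aux var2 hc =>
    rw [asignacionLoop1, if_neg hc]
    have : var2 = 0 := by omega
    simp [this]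

theorem loop2_nonneg (var1 var2 aux : Int) (h : 0 ≤ aux) :
    asignacionLoop2 var1 var2 aux = (var1 + aux, var2 + aux) := by
  induction var1, var2, aux using asignacionLoop2.induct with
  | case1 var1 var2 aux hc ih =>
    rw [asignacionLoop2, if_pos hc, ih (by simp [decremento]; omega)]
    simp only [incremento, decremento, Prod.mk.injEq]
    constructor <;> ring
  | case2 var1 var2 aux hc =>
    rw [asignacionLoop2, if_neg hc]
    have : aux = 0 := by omega
    simp [this]

-- ===== VERDICT (by name: the statement is the Claim_ definition above) =====
theorem asignacion_spec : Claim_equal_asignacion := by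
  intro var1 var2 aux _ ⟨h1, h2, h3⟩
  unfold Spec_asignacion asignacion asignacion_alt
  simp only [borrar_nonneg aux h3, borrar_nonneg var1 h1,
    loop1_nonneg 0 var2 h2]
  rw [loop2_nonneg 0 0 (0 + var2) (by omega)]
  simp
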